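-- pv_equiv track=rewrite | github.com/alexbolotin/Bolotin_belhard_python_2022 | homework/09/to3_words.py | finall
-- ===== SOURCE A (Python) =====
-- def finall(val):
--     n = 0
--     final_dict = {}
--     for i in val:
--         if n == 3:
--             break
--         else:
--             final_dict[i] = val[i]
--             n += 1
--     return final_dict
-- ===== SOURCE B (Python) =====
-- def finall(val):
--     return dict(list(val.items())[:3])
-- ===== Notes on version B (the rewrite author's own statement) =====
-- stated objective: simpler
-- what changed: Replaces A's counted loop with early break and per-key dict lookup by a one-line build-then-slice pipeline: materialize the items, slice the first three, rebuild a dict.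
import Mathlib
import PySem

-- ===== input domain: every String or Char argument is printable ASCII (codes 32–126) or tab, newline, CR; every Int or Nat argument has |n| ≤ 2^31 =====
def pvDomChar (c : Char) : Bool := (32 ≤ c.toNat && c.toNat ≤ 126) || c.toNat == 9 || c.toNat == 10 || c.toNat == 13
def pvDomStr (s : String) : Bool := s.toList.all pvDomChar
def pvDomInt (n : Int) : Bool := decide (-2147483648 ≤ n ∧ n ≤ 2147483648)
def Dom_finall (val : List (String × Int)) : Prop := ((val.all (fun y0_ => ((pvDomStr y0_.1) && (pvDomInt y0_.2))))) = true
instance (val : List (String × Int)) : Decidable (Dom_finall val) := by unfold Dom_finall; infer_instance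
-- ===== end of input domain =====

-- B replaces A's counted early-break scan (with a per-key dict lookup) by a build-then-slice
-- pipeline: list the items, take the first three positionally, rebuild a dict (simpler).

-- ===== PORT A =====
-- A iterates the dict's keys with a counter n, breaking at n == 3, and inserts val[i]
-- (a lookup by key) into a fresh dict.
def finallGoA (val : List (String × Int)) :
    List String → Int → PySem.Dict String Int → PySem.Dict String Int
  | [], _, d => d
  | i :: rest, n, d =>
    if n = 3 then d
    else
      -- final_dict[i] = val[i]: lookup by key (first match); none = KeyError, unreachable
      -- since i is one of val's keys.
      match val.find? (fun p => p.1 == i) with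
      | some p => finallGoA val rest (n + 1) (d.insert i p.2)
      | none => d

def finall (val : List (String × Int)) : List (String × Int) :=
  (finallGoA val (val.map Prod.fst) 0 PySem.Dict.empty).items

-- ===== PORT B =====
-- return dict(list(val.items())[:3])
def finall_alt (val : List (String × Int)) : List (String × Int) :=
  (PySem.Dict.ofList (PySem.List.slice val none (some 3))).items

-- ===== PRECONDITION & SPEC =====
-- Pre_ excludes association lists with duplicate keys: they do not denote a well-defined
-- Python dict argument (dict construction collapses duplicates before finall ever runs).
def Pre_finall (val : List (String × Int)) : Prop := (val.map Prod.fst).Nodup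

instance (val : List (String × Int)) : Decidable (Pre_finall val) := by
  unfold Pre_finall; infer_instance

def pvWitness_finall : (List (String × Int)) := [("a", 1), ("b", 2), ("c", 3), ("d", 4)]

def Spec_finall (val : List (String × Int)) (out : List (String × Int)) : Prop :=
  out = finall_alt val
instance (val : List (String × Int)) (out : List (String × Int)) :
    Decidable (Spec_finall val out) := by unfold Spec_finall; infer_instance

-- ===== CLAIM (what is proved, stated in full; the proofs are below) =====
def Claim_equal_finall : Prop :=
  ∀ (val : List (String × Int)), Dom_finall val → Pre_finall val →
    Spec_finall val (finall val)

-- ===== LEMMAS AND PROOFS =====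

theorem findFirst_nodup (val : List (String × Int)) (hnd : (val.map Prod.fst).Nodup)
    (k : String) (v : Int) (hmem : (k, v) ∈ val) :
    val.find? (fun p => p.1 == k) = some (k, v) := by
  cases hfind : val.find? (fun p => p.1 == k) with
  | none =>
    have := List.find?_eq_none.mp hfind (k, v) hmem
    simp at this
  | some q =>
    have hq : q ∈ val := List.mem_of_find?_eq_some hfind
    have hqk : q.1 = k := by
      have := List.find?_some hfind
      simpa using this
    have hinj := List.inj_on_of_nodup_map hnd
    have : q = (k, v) := hinj hq hmem (by simp [hqk])
    rw [this]

theorem goA_items (val : List (String × Int)) (hnd : (val.map Prod.fst).Nodup) :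
    ∀ (rest : List (String × Int)) (n : Int) (d : PySem.Dict String Int),
      rest.Sublist val → 0 ≤ n → n ≤ 3 →
      (∀ p ∈ rest, d.contains p.1 = false) →
      (finallGoA val (rest.map Prod.fst) n d).items
        = d.items ++ rest.take (3 - n).toNat := by
  intro rest
  induction rest with
  | nil => intro n d _ _ _ _; simp [finallGoA]
  | cons hd tl ih =>
    intro n d hsub h0 h3 hfresh
    obtain ⟨k, v⟩ := hd
    by_cases hn : n = 3
    · subst hn
      simp [finallGoA]
    · have hn3 : n < 3 := lt_of_le_of_ne h3 hn
      have hmem : (k, v) ∈ val := hsub.subset (by simp)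
      have hkeys : (((k, v) :: tl).map Prod.fst).Nodup :=
        (hsub.map Prod.fst).nodup hnd
      have hknotin : k ∉ tl.map Prod.fst := by
        intro hmemk
        obtain ⟨p, hp, hpk⟩ := List.mem_map.mp hmemk
        have hpair : (∀ (x : ℤ), (k, x) ∉ tl) ∧ (tl.map Prod.fst).Nodup := by
          simpa using hkeys
        exact hpair.1 p.2 (by rwa [show (k, p.2) = p from Prod.ext hpk.symm rfl])
      have hfind := findFirst_nodup val hnd k v hmem
      have hdk : d.contains k = false := hfresh (k, v) (by simp)
      have hfresh' : ∀ p ∈ tl, (d.insert k v).contains p.1 = false := by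
        intro p hp
        have h1 : d.contains p.1 = false := hfresh p (by simp [hp])
        have h2 : p.1 ≠ k := by
          intro heq
          exact hknotin (heq ▸ List.mem_map_of_mem hp)
        simp [PySem.Dict.contains_insert, h1, h2]
      have hrec := ih (n + 1) (d.insert k v) (List.sublist_of_cons_sublist hsub)
        (by omega) (by omega) hfresh'
      have htoNat : (3 - n).toNat = (3 - (n + 1)).toNat + 1 := by omega
      simp only [List.map_cons, finallGoA, if_neg hn, hfind]
      rw [hrec, PySem.Dict.items_insert_of_not_contains (h := hdk), htoNat]
      simp

theorem ofList_items_of_nodup (l : List (String × Int)) (h : (l.map Prod.fst).Nodup) :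
    (PySem.Dict.ofList l).items = l := by
  have hdef : PySem.Dict.ofList l = l.foldl (fun d p => d.insert p.1 p.2) PySem.Dict.empty := rfl
  rw [hdef]
  have := PySem.Dict.items_foldl_insert_fresh (l := l) (k := Prod.fst) (v := Prod.snd)
    (d := PySem.Dict.empty) (by simp [PySem.Dict.contains_empty]) h
  simpa using this

theorem finall_take3 (val : List (String × Int)) (h : Pre_finall val) :
    finall val = val.take 3 := by
  unfold finall
  have := goA_items val h val 0 PySem.Dict.empty (List.Sublist.refl val)
    (by omega) (by omega) (by intro p _; simp [PySem.Dict.contains_empty])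
  simpa using this

theorem finall_alt_take3 (val : List (String × Int)) (h : Pre_finall val) :
    finall_alt val = val.take 3 := by
  unfold finall_alt
  have hslice : PySem.List.slice val none (some 3) = val.take 3 := by
    have := PySem.List.slice_to_natCast val 3
    simpa using this
  rw [hslice]
  apply ofList_items_of_nodup
  rw [List.map_take]
  exact h.sublist ((val.map Prod.fst).take_sublist 3)

-- ===== VERDICT (by name: the statement is the Claim_ definition above) =====
theorem finall_spec : Claim_equal_finall := by
  intro val _ hpre
  unfold Spec_finall
  rw [finall_take3 val hpre, finall_alt_take3 val hpre]
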